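-- pv_equiv track=rewrite | github.com/Flamefork/sqlglot-ts | tools/compat/time_shim.py | highlight_sql
-- ===== SOURCE A (Python) =====
-- import operator
--
-- ANSI_UNDERLINE = "\033[4m"
--
-- ANSI_RESET = "\033[0m"
--
-- ERROR_MESSAGE_CONTEXT_DEFAULT = 100
--
-- def highlight_sql(
--     sql: str,
--     positions: list[tuple[int, int]],
--     context_length: int = ERROR_MESSAGE_CONTEXT_DEFAULT,
-- ) -> tuple[str, str, str, str]:
--     if not positions:
--         msg = "positions must contain at least one (start, end) tuple"
--         raise ValueError(msg)
--
--     start_context = ""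
--     end_context = ""
--     first_highlight_start = 0
--     formatted_parts: list[str] = []
--     previous_part_end = 0
--     sorted_positions = sorted(positions, key=operator.itemgetter(0))
--
--     if sorted_positions[0][0] > 0:
--         first_highlight_start = sorted_positions[0][0]
--         start_context = sql[
--             max(0, first_highlight_start - context_length) : first_highlight_start
--         ]
--         formatted_parts.append(start_context)
--         previous_part_end = first_highlight_start
--
--     for start, end in sorted_positions:
--         highlight_start = max(start, previous_part_end)
--         highlight_end = end + 1
--         if highlight_start >= highlight_end:
--             continue
--         if highlight_start > previous_part_end:
--             formatted_parts.append(sql[previous_part_end:highlight_start])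
--         formatted_parts.append(
--             f"{ANSI_UNDERLINE}{sql[highlight_start:highlight_end]}{ANSI_RESET}"
--         )
--         previous_part_end = highlight_end
--
--     if previous_part_end < len(sql):
--         end_context = sql[previous_part_end : previous_part_end + context_length]
--         formatted_parts.append(end_context)
--
--     formatted_sql = "".join(formatted_parts)
--     highlight = sql[first_highlight_start:previous_part_end]
--
--     return formatted_sql, start_context, highlight, end_context
-- ===== SOURCE B (Python) =====
-- ANSI_UNDERLINE = "\033[4m"
-- ANSI_RESET = "\033[0m"
-- ERROR_MESSAGE_CONTEXT_DEFAULT = 100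
--
-- def highlight_sql(sql, positions, context_length=ERROR_MESSAGE_CONTEXT_DEFAULT):
--     if not positions:
--         raise ValueError("positions must contain at least one (start, end) tuple")
--     min_start = min(p[0] for p in positions)
--     fhs = max(0, min_start)
--     # phase 1: pure interval arithmetic — segment list, no strings
--     valid = [(s, e + 1) for s, e in sorted(positions, key=lambda p: p[0]) if s <= e]
--     bounds = [fhs]
--     for _, e1 in valid:
--         bounds.append(max(bounds[-1], e1))
--     segs = [(max(s, b), e1) for (s, e1), b in zip(valid, bounds) if e1 > b]
--     ppe = segs[-1][1] if segs else fhs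
--     # phase 2: render
--     start_context = sql[max(0, fhs - context_length):fhs] if min_start > 0 else ""
--     end_context = sql[ppe:ppe + context_length] if ppe < len(sql) else ""
--     out = start_context
--     prev = fhs
--     for a, b in segs:
--         out += sql[prev:a] + ANSI_UNDERLINE + sql[a:b] + ANSI_RESET
--         prev = b
--     out += end_context
--     return out, start_context, sql[fhs:ppe], end_context
-- ===== Notes on version B (the rewrite author's own statement) =====
-- stated objective: alternative
-- what changed: Replaces A's single interleaved loop (which builds ANSI strings while tracking previous_part_end) with a two-phase pipeline: phase 1 computes the highlighted segment list by pure interval arithmetic (validity filter, prefix-max bounds list, zip+filter comprehension), phase 2 renders the segments and contexts from that list.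
import Mathlib
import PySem

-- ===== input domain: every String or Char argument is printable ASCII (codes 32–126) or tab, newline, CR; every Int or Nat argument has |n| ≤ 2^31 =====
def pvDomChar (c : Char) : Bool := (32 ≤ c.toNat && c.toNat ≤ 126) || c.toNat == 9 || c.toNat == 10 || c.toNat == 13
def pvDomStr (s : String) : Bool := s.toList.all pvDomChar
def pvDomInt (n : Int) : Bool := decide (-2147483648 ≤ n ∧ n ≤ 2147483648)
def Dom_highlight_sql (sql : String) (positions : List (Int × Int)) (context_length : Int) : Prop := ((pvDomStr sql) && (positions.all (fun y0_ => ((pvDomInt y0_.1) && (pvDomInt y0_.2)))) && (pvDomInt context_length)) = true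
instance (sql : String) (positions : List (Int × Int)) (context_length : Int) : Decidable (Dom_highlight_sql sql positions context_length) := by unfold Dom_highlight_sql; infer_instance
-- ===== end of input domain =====

-- B replaces A's interleaved format-while-scanning loop by a two-phase pipeline (segment list by
-- interval arithmetic, then rendering); Pre_ excludes only the empty positions list, on which A
-- raises ValueError (and B raises too).


-- "\033[4m" / "\033[0m" as code-point lists
def pvUnderline : List Char := [Char.ofNat 27, '[', '4', 'm']
def pvReset : List Char := [Char.ofNat 27, '[', '0', 'm']

-- ===== PORT A =====
-- A's for-loop over sorted_positions, state = (formatted_parts, previous_part_end)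
def hlLoopA (cs : List Char) (l : List (Int × Int)) (parts : List (List Char)) (ppe : Int) :
    List (List Char) × Int :=
  match l with
  | [] => (parts, ppe)
  | (s, e) :: rest =>
    let hs := max s ppe
    let he := e + 1
    if hs ≥ he then hlLoopA cs rest parts ppe
    else
      let parts1 := if hs > ppe then parts ++ [PySem.List.slice cs (some ppe) (some hs)] else parts
      hlLoopA cs rest
        (parts1 ++ [pvUnderline ++ PySem.List.slice cs (some hs) (some he) ++ pvReset]) he

def highlight_sql (sql : String) (positions : List (Int × Int)) (context_length : Int) :
    String × String × String × String :=
  let cs := sql.toList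
  let sorted_positions := PySem.List.sorted positions (fun p => p.1) false
  match sorted_positions with
  | [] => ("", "", "", "")  -- unreachable under Pre_: Python A raises ValueError on empty positions
  | (s0, e0) :: tl =>
    let (start_context, first_highlight_start, parts0, ppe0) :=
      if s0 > 0 then
        let sc := PySem.List.slice cs (some (max 0 (s0 - context_length))) (some s0)
        (sc, s0, [sc], s0)
      else (([] : List Char), (0 : Int), ([] : List (List Char)), (0 : Int))
    let st := hlLoopA cs ((s0, e0) :: tl) parts0 ppe0
    let previous_part_end := st.2
    let (end_context, partsF) :=
      if previous_part_end < (cs.length : Int) then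
        let ec := PySem.List.slice cs (some previous_part_end) (some (previous_part_end + context_length))
        (ec, st.1 ++ [ec])
      else (([] : List Char), st.1)
    (String.ofList partsF.flatten,            -- "".join(formatted_parts)
     String.ofList start_context,
     String.ofList (PySem.List.slice cs (some first_highlight_start) (some previous_part_end)),
     String.ofList end_context)

-- ===== PORT B =====
-- bounds loop of Source B: bounds = [fhs]; for _, e1 in valid: bounds.append(max(bounds[-1], e1))
def pvBounds (valid : List (Int × Int)) (init : List Int) : List Int :=
  valid.foldl (fun bs p => bs ++ [max (PySem.List.pyGetD bs (-1) 0) p.2]) init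

-- render loop of Source B: for a, b in segs: out += sql[prev:a] + UNDERLINE + sql[a:b] + RESET
def pvRender (cs : List Char) (segs : List (Int × Int)) (init : List Char × Int) :
    List Char × Int :=
  segs.foldl
    (fun st q =>
      (st.1 ++ PySem.List.slice cs (some st.2) (some q.1) ++ pvUnderline ++
        PySem.List.slice cs (some q.1) (some q.2) ++ pvReset, q.2))
    init

def highlight_sql_alt (sql : String) (positions : List (Int × Int)) (context_length : Int) :
    String × String × String × String :=
  let cs := sql.toList
  match PySem.List.min? (positions.map (fun p => p.1)) (fun x => x) with
  | none => ("", "", "", "")  -- unreachable under Pre_: Source B raises ValueError on empty positions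
  | some min_start =>
    let fhs := max 0 min_start
    let valid := ((PySem.List.sorted positions (fun p => p.1) false).filter
        (fun p => p.1 ≤ p.2)).map (fun p => (p.1, p.2 + 1))
    let bounds := pvBounds valid [fhs]
    let segs := ((valid.zip bounds).filter (fun q => q.2 < q.1.2)).map
        (fun q => (max q.1.1 q.2, q.1.2))
    let ppe := if segs ≠ [] then (PySem.List.pyGetD segs (-1) ((0 : Int), (0 : Int))).2 else fhs
    let start_context :=
      if min_start > 0 then PySem.List.slice cs (some (max 0 (fhs - context_length))) (some fhs)
      else ([] : List Char)
    let end_context :=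
      if ppe < (cs.length : Int) then PySem.List.slice cs (some ppe) (some (ppe + context_length))
      else ([] : List Char)
    let out := (pvRender cs segs (start_context, fhs)).1 ++ end_context
    (String.ofList out, String.ofList start_context,
     String.ofList (PySem.List.slice cs (some fhs) (some ppe)), String.ofList end_context)

-- ===== PRECONDITION & SPEC =====
-- Pre_ excludes exactly the empty positions list, on which Python A raises ValueError.
def Pre_highlight_sql (sql : String) (positions : List (Int × Int)) (context_length : Int) : Prop :=
  positions ≠ []
instance (sql : String) (positions : List (Int × Int)) (context_length : Int) :
    Decidable (Pre_highlight_sql sql positions context_length) := by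
  unfold Pre_highlight_sql; infer_instance

def pvWitness_highlight_sql : String × (List (Int × Int)) × Int :=
  ("SELECT a FROM t", [((7 : Int), (7 : Int))], (3 : Int))

def Spec_highlight_sql (sql : String) (positions : List (Int × Int)) (context_length : Int)
    (out : String × String × String × String) : Prop :=
  out = highlight_sql_alt sql positions context_length
instance (sql : String) (positions : List (Int × Int)) (context_length : Int)
    (out : String × String × String × String) : Decidable (Spec_highlight_sql sql positions context_length out) := by
  unfold Spec_highlight_sql; infer_instance

-- ===== CLAIM (what is proved, stated in full; the proofs are below) =====
def Claim_equal_highlight_sql : Prop := ∀ (sql : String) (positions : List (Int × Int)) (context_length : Int), Dom_highlight_sql sql positions context_length → Pre_highlight_sql sql positions context_length → Spec_highlight_sql sql positions context_length (highlight_sql sql positions context_length)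

-- ===== LEMMAS AND PROOFS =====

-- proof-only: recursive form of B's segment pipeline
def segsRec (l : List (Int × Int)) (cur : Int) : List (Int × Int) :=
  match l with
  | [] => []
  | (s, e1) :: rest =>
    if cur < e1 then (max s cur, e1) :: segsRec rest (max cur e1)
    else segsRec rest (max cur e1)

-- proof-only: the tail of the bounds list (running max)
def scanB (cur : Int) (l : List (Int × Int)) : List Int :=
  match l with
  | [] => []
  | (_, e1) :: rest => max cur e1 :: scanB (max cur e1) rest

theorem pvBounds_eq (valid : List (Int × Int)) :
    ∀ (bs : List Int) (c : Int), bs ≠ [] → PySem.List.pyGetD bs (-1) 0 = c →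
      pvBounds valid bs = bs ++ scanB c valid := by
  induction valid with
  | nil => intro bs c _ _; simp [pvBounds, scanB]
  | cons p rest ih =>
    intro bs c hne hlast
    obtain ⟨s, e1⟩ := p
    show pvBounds rest (bs ++ [max (PySem.List.pyGetD bs (-1) 0) e1]) = _
    rw [hlast, ih (bs ++ [max c e1]) (max c e1) (by simp)
      (PySem.List.pyGetD_neg_one_append_singleton bs (max c e1) 0)]
    simp [scanB]

theorem segs_pipeline_eq (valid : List (Int × Int)) :
    ∀ (c : Int),
      ((valid.zip (c :: scanB c valid)).filter (fun q => q.2 < q.1.2)).map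
          (fun q => (max q.1.1 q.2, q.1.2)) = segsRec valid c := by
  induction valid with
  | nil => intro c; simp [segsRec]
  | cons p rest ih =>
    intro c
    obtain ⟨s, e1⟩ := p
    show ((((s, e1), c) :: (rest.zip (scanB c ((s, e1) :: rest)))).filter _).map _ = _
    rw [show scanB c ((s, e1) :: rest) = max c e1 :: scanB (max c e1) rest from rfl]
    by_cases h : c < e1
    · simp only [segsRec, h]
      simp [h, ih (max c e1)]
    · simp only [segsRec, List.filter_cons, if_neg h]
      simp [h, ih (max c e1)]

theorem slice_self (cs : List Char) (c : Int) (hc : 0 ≤ c) :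
    PySem.List.slice cs (some c) (some c) = [] := by
  rw [PySem.List.slice_toNat cs hc hc]; simp

theorem loopA_eq_render (cs : List Char) (l : List (Int × Int)) :
    ∀ (parts : List (List Char)) (cur : Int), 0 ≤ cur →
      ((hlLoopA cs l parts cur).1.flatten, (hlLoopA cs l parts cur).2) =
        pvRender cs
          (segsRec ((l.filter (fun p => p.1 ≤ p.2)).map (fun p => (p.1, p.2 + 1))) cur)
          (parts.flatten, cur) := by
  induction l with
  | nil => intro parts cur _; simp [hlLoopA, segsRec, pvRender]
  | cons p rest ih =>
    intro parts cur hcur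
    obtain ⟨s, e⟩ := p
    by_cases hval : s ≤ e
    · by_cases hlt : cur < e + 1
      · -- kept: A emits gap (maybe) + underline; B's segsRec emits (max s cur, e+1)
        have hskip : ¬ (max s cur ≥ e + 1) := by omega
        show ((hlLoopA cs ((s, e) :: rest) parts cur).1.flatten, _) = _
        rw [show hlLoopA cs ((s, e) :: rest) parts cur =
            hlLoopA cs rest
              ((if max s cur > cur then
                  parts ++ [PySem.List.slice cs (some cur) (some (max s cur))]
                else parts) ++
                [pvUnderline ++ PySem.List.slice cs (some (max s cur)) (some (e + 1)) ++ pvReset])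
              (e + 1) from by
          simp only [hlLoopA]; rw [if_neg hskip]]
        rw [ih _ (e + 1) (by omega)]
        have hseg : ((((s, e) :: rest).filter (fun p => p.1 ≤ p.2)).map
            (fun p => (p.1, p.2 + 1))) = (s, e + 1) ::
            ((rest.filter (fun p => p.1 ≤ p.2)).map (fun p => (p.1, p.2 + 1))) := by
          simp [hval]
        rw [hseg]
        have hmax : max cur (e + 1) = e + 1 := by omega
        simp only [segsRec, if_pos hlt, hmax, pvRender, List.foldl_cons]
        congr 2
        by_cases hgap : max s cur > cur
        · simp [hgap, List.flatten_append]
        · have hms : max s cur = cur := by omega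
          simp [hms, slice_self cs cur hcur, List.flatten_append]
      · -- valid but already covered: both skip
        have hskip : max s cur ≥ e + 1 := by omega
        show ((hlLoopA cs ((s, e) :: rest) parts cur).1.flatten, _) = _
        rw [show hlLoopA cs ((s, e) :: rest) parts cur = hlLoopA cs rest parts cur from by
          simp only [hlLoopA]; rw [if_pos hskip]]
        rw [ih parts cur hcur]
        have hmax : max cur (e + 1) = cur := by omega
        simp [hval, segsRec, hlt, hmax]
    · -- invalid (s > e): both skip
      have hskip : max s cur ≥ e + 1 := by omega
      show ((hlLoopA cs ((s, e) :: rest) parts cur).1.flatten, _) = _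
      rw [show hlLoopA cs ((s, e) :: rest) parts cur = hlLoopA cs rest parts cur from by
        simp only [hlLoopA]; rw [if_pos hskip]]
      rw [ih parts cur hcur]
      simp [hval]

theorem render_snd (cs : List Char) (segs : List (Int × Int)) :
    ∀ (init : List Char × Int),
      (pvRender cs segs init).2 =
        if segs ≠ [] then (PySem.List.pyGetD segs (-1) ((0 : Int), (0 : Int))).2 else init.2 := by
  induction segs with
  | nil => intro init; simp [pvRender]
  | cons q rest ih =>
    intro init
    show (pvRender cs rest _).2 = _
    rw [ih]
    cases rest with
    | nil => simp [PySem.List.pyGetD_neg_one [q] ((0 : Int), (0 : Int)) (by simp)]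
    | cons q' rest' =>
      rw [if_pos (by simp), if_pos (by simp),
        PySem.List.pyGetD_neg_one (q :: q' :: rest') ((0 : Int), (0 : Int)) (by simp),
        PySem.List.pyGetD_neg_one (q' :: rest') ((0 : Int), (0 : Int)) (by simp)]
      simp [List.getLast_cons]

theorem min_eq_head_sorted (positions : List (Int × Int)) (s0 : Int) (e0 : Int)
    (tl : List (Int × Int))
    (h : PySem.List.sorted positions (fun p => p.1) false = (s0, e0) :: tl) :
    PySem.List.min? (positions.map (fun p => p.1)) (fun x => x) = some s0 := by
  have hne : positions ≠ [] := by
    intro h0; rw [h0] at h; simp [PySem.List.sorted] at h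
  have hmapne : positions.map (fun p => p.1) ≠ [] := by simpa using hne
  rcases hm : PySem.List.min? (positions.map (fun p => p.1)) (fun x => x) with _ | m
  · exact absurd ((PySem.List.min?_eq_none_iff _ _).mp hm) hmapne
  have hmem : m ∈ positions.map (fun p => p.1) := PySem.List.min?_mem hm
  have hs0mem : s0 ∈ positions.map (fun p => p.1) := by
    have : ((s0, e0) : Int × Int) ∈ positions := by
      rw [← PySem.List.mem_sorted positions (fun p => p.1) false ((s0, e0)), h]; simp
    exact List.mem_map.mpr ⟨(s0, e0), this, rfl⟩
  have h1 : m ≤ s0 := PySem.List.min?_isMin hm s0 hs0mem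
  have h2 : s0 ≤ m := by
    obtain ⟨p, hp, hpm⟩ := List.mem_map.mp hmem
    have h3 : s0 ≤ p.1 := by
      simpa using PySem.List.key_head_sorted_le positions (fun p => p.1) h p hp
    exact le_of_le_of_eq h3 hpm
  rw [hm]; exact congrArg some (le_antisymm h1 h2)

-- ===== VERDICT (by name: the statement is the Claim_ definition above) =====
theorem highlight_sql_spec : Claim_equal_highlight_sql := by
  intro sql positions context_length _ hpre
  unfold Spec_highlight_sql highlight_sql highlight_sql_alt
  have hspne : PySem.List.sorted positions (fun p => p.1) false ≠ [] :=
    fun h0 => hpre ((PySem.List.sorted_eq_nil_iff positions (fun p => p.1) false).mp h0)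
  rcases hsp : PySem.List.sorted positions (fun p => p.1) false with _ | ⟨⟨s0, e0⟩, tl⟩
  · exact absurd hsp hspne
  rw [min_eq_head_sorted positions s0 e0 tl hsp]
  dsimp only
  by_cases h0 : s0 > 0
  · simp only [if_pos h0]
    have hm0 : max 0 s0 = s0 := by omega
    simp only [hm0]
    have hb : pvBounds
        ((((s0, e0) :: tl).filter (fun p => p.1 ≤ p.2)).map (fun p => (p.1, p.2 + 1))) [s0] =
        s0 :: scanB s0 ((((s0, e0) :: tl).filter (fun p => p.1 ≤ p.2)).map (fun p => (p.1, p.2 + 1))) := by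
      rw [pvBounds_eq _ [s0] s0 (by simp)
        (by rw [PySem.List.pyGetD_neg_one [s0] 0 (by simp)]; simp)]
      simp
    rw [hb, segs_pipeline_eq]
    have hst := loopA_eq_render sql.toList ((s0, e0) :: tl)
      [PySem.List.slice sql.toList (some (max 0 (s0 - context_length))) (some s0)] s0 (by omega)
    have h1 := congrArg Prod.fst hst
    have h2 := congrArg Prod.snd hst
    simp only [List.flatten_cons, List.flatten_nil, List.append_nil] at h1 h2
    rw [h2]
    have hr : (if segsRec ((((s0, e0) :: tl).filter (fun p => p.1 ≤ p.2)).map (fun p => (p.1, p.2 + 1))) s0 ≠ [] then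
          (PySem.List.pyGetD
            (segsRec ((((s0, e0) :: tl).filter (fun p => p.1 ≤ p.2)).map (fun p => (p.1, p.2 + 1))) s0)
            (-1) ((0 : Int), (0 : Int))).2
        else s0) =
        (pvRender sql.toList
          (segsRec ((((s0, e0) :: tl).filter (fun p => p.1 ≤ p.2)).map (fun p => (p.1, p.2 + 1))) s0)
          (PySem.List.slice sql.toList (some (max 0 (s0 - context_length))) (some s0), s0)).2 := by
      rw [render_snd]
    rw [hr]
    by_cases hend : (pvRender sql.toList
        (segsRec ((((s0, e0) :: tl).filter (fun p => p.1 ≤ p.2)).map (fun p => (p.1, p.2 + 1))) s0)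
        (PySem.List.slice sql.toList (some (max 0 (s0 - context_length))) (some s0), s0)).2 <
        (sql.toList.length : Int)
    · simp only [if_pos hend, List.flatten_append, List.flatten_cons, List.flatten_nil,
        List.append_nil, h1]
    · simp only [if_neg hend, List.append_nil, h1]
  · simp only [if_neg h0]
    have hm0 : max 0 s0 = 0 := by omega
    simp only [hm0]
    have hb : pvBounds
        ((((s0, e0) :: tl).filter (fun p => p.1 ≤ p.2)).map (fun p => (p.1, p.2 + 1))) [0] =
        0 :: scanB 0 ((((s0, e0) :: tl).filter (fun p => p.1 ≤ p.2)).map (fun p => (p.1, p.2 + 1))) := by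
      rw [pvBounds_eq _ [0] 0 (by simp)
        (by rw [PySem.List.pyGetD_neg_one [0] 0 (by simp)]; simp)]
      simp
    rw [hb, segs_pipeline_eq]
    have hst := loopA_eq_render sql.toList ((s0, e0) :: tl) [] 0 le_rfl
    have h1 := congrArg Prod.fst hst
    have h2 := congrArg Prod.snd hst
    simp only [List.flatten_nil] at h1 h2
    rw [h2]
    have hr : (if segsRec ((((s0, e0) :: tl).filter (fun p => p.1 ≤ p.2)).map (fun p => (p.1, p.2 + 1))) 0 ≠ [] then
          (PySem.List.pyGetD
            (segsRec ((((s0, e0) :: tl).filter (fun p => p.1 ≤ p.2)).map (fun p => (p.1, p.2 + 1))) 0)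
            (-1) ((0 : Int), (0 : Int))).2
        else (0 : Int)) =
        (pvRender sql.toList
          (segsRec ((((s0, e0) :: tl).filter (fun p => p.1 ≤ p.2)).map (fun p => (p.1, p.2 + 1))) 0)
          (([] : List Char), (0 : Int))).2 := by
      rw [render_snd]
    rw [hr]
    by_cases hend : (pvRender sql.toList
        (segsRec ((((s0, e0) :: tl).filter (fun p => p.1 ≤ p.2)).map (fun p => (p.1, p.2 + 1))) 0)
        (([] : List Char), (0 : Int))).2 < (sql.toList.length : Int)
    · simp only [if_pos hend, List.flatten_append, List.flatten_cons, List.flatten_nil,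
        List.append_nil, h1]
    · simp only [if_neg hend, List.append_nil, h1]
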